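-- pv_equiv track=rewrite | github.com/remarkablerocket/changelog-cli | src/changelog/utils.py | crunch_lines
-- ===== SOURCE A (Python) =====
-- def crunch_lines(line_list):
--     """
--     Removes triplicate blank lines from changelog to prevent it from getting too long
--     """
--     i = 2
--     while i < len(line_list):
--         here = line_list[i]
--         minus_1 = line_list[i - 1]
--         minus_2 = line_list[i - 2]
--         if here == minus_1 == minus_2 == "\n":
--             line_list.pop(i)
--         elif minus_2 == '---\n' and here == minus_1 == '\n':
--             line_list.pop(i)
--         else:
--             i += 1
--     return line_list
-- ===== SOURCE B (Python) =====
-- def crunch_lines(line_list):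
--     """
--     Removes triplicate blank lines from changelog to prevent it from getting too long
--     """
--     out = []
--     for line in line_list:
--         if (line == "\n" and len(out) >= 2 and out[-1] == "\n"
--                 and (out[-2] == "\n" or out[-2] == "---\n")):
--             continue
--         out.append(line)
--     return out
-- ===== Notes on version B (the rewrite author's own statement) =====
-- stated objective: faster
-- what changed: Replaced the in-place while loop with repeated list.pop(i) (each pop shifts the tail) by a single forward pass that builds a fresh output list and skips a newline when the last two kept lines make it a triplicate blank or a post-divider double blank; B returns a new list instead of mutating its argument.
import Mathlib
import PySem

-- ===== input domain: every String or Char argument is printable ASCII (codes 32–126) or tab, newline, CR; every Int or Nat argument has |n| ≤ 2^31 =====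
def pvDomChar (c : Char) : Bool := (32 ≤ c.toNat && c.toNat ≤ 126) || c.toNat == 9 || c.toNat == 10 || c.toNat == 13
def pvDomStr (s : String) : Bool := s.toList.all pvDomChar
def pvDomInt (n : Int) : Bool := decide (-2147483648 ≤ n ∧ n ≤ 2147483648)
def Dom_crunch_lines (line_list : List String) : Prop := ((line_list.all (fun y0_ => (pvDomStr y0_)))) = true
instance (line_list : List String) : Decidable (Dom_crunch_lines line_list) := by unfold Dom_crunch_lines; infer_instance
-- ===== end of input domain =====

-- B replaces A's in-place while loop with repeated pop (quadratic) by one linear pass building a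
-- new list; equivalence is about the RETURN value only — A mutates its argument, B does not.

-- ===== PORT A =====
-- A's while loop: state is (current list, index i). i starts at 2 and only indices ≥ 2 are
-- inspected, so i-1 / i-2 are in range; line_list[j] with proven 0 ≤ j < len is exactly getD.
-- line_list.pop(i) with 0 ≤ i < len is exactly List.eraseIdx i.
def crunchA_loop (line_list : List String) (i : Nat) : List String :=
  if _h : i < line_list.length then
    let here := line_list.getD i ""
    let minus_1 := line_list.getD (i - 1) ""
    let minus_2 := line_list.getD (i - 2) ""
    if here = "\n" ∧ minus_1 = "\n" ∧ minus_2 = "\n" then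
      crunchA_loop (line_list.eraseIdx i) i
    else if minus_2 = "---\n" ∧ here = "\n" ∧ minus_1 = "\n" then
      crunchA_loop (line_list.eraseIdx i) i
    else
      crunchA_loop line_list (i + 1)
  else line_list
termination_by line_list.length - i
decreasing_by
  · simp [List.length_eraseIdx, *]; omega
  · simp [List.length_eraseIdx, *]; omega
  · omega

def crunch_lines (line_list : List String) : List String :=
  crunchA_loop line_list 2

-- ===== PORT B =====
-- B's for loop over the input, accumulator out; out[-1] / out[-2] under the len(out) ≥ 2 guard
-- are exactly getD (len-1) / getD (len-2).
def crunchB_step (out : List String) (line : String) : List String :=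
  if line = "\n" ∧ 2 ≤ out.length ∧ out.getD (out.length - 1) "" = "\n" ∧
      (out.getD (out.length - 2) "" = "\n" ∨ out.getD (out.length - 2) "" = "---\n") then
    out
  else out ++ [line]

def crunch_lines_alt (line_list : List String) : List String :=
  line_list.foldl crunchB_step []

-- ===== PRECONDITION & SPEC =====
def Spec_crunch_lines (line_list : List String) (out : List String) : Prop := out = crunch_lines_alt line_list
instance (line_list : List String) (out : List String) : Decidable (Spec_crunch_lines line_list out) := by unfold Spec_crunch_lines; infer_instance

-- ===== CLAIM (what is proved, stated in full; the proofs are below) =====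
def Claim_equal_crunch_lines : Prop := ∀ (line_list : List String), Dom_crunch_lines line_list → Spec_crunch_lines line_list (crunch_lines line_list)

-- ===== LEMMAS AND PROOFS =====

lemma eraseIdx_append_mid (l : List String) (x : String) (l' : List String) :
    (l ++ x :: l').eraseIdx l.length = l ++ l' := by
  induction l with
  | nil => simp
  | cons a t ih => simpa [List.eraseIdx] using ih

lemma getD_append_lt (l l' : List String) (i : Nat) (h : i < l.length) :
    (l ++ l').getD i "" = l.getD i "" := by
  simp [List.getD, List.getElem?_append_left h]

lemma getD_append_self (l : List String) (x : String) (l' : List String) :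
    (l ++ x :: l').getD l.length "" = x := by
  simp [List.getD]

-- invariant of A's loop: once the first `done.length ≥ 2` lines are fixed, A's loop at index
-- `done.length` computes exactly B's fold over the remaining lines with accumulator `done`.
lemma loop_eq (rest : List String) : ∀ (done : List String), 2 ≤ done.length →
    crunchA_loop (done ++ rest) done.length = List.foldl crunchB_step done rest := by
  induction rest with
  | nil =>
    intro done _
    rw [crunchA_loop]
    simp
  | cons line rest ih =>
    intro done h2
    rw [crunchA_loop]
    have hlen : done.length < (done ++ line :: rest).length := by simp
    have h0 : (done ++ line :: rest).getD done.length "" = line := getD_append_self _ _ _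
    have h1 : (done ++ line :: rest).getD (done.length - 1) "" = done.getD (done.length - 1) "" :=
      getD_append_lt _ _ _ (by omega)
    have h2' : (done ++ line :: rest).getD (done.length - 2) "" = done.getD (done.length - 2) "" :=
      getD_append_lt _ _ _ (by omega)
    simp only [hlen, dif_pos, h0, h1, h2']
    by_cases c1 : line = "\n" ∧ done.getD (done.length - 1) "" = "\n" ∧ done.getD (done.length - 2) "" = "\n"
    · have herase : (done ++ line :: rest).eraseIdx done.length = done ++ rest :=
        eraseIdx_append_mid _ _ _
      have cB : crunchB_step done line = done := by
        unfold crunchB_step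
        rw [if_pos ⟨c1.1, h2, c1.2.1, Or.inl c1.2.2⟩]
      rw [if_pos c1, herase, ih done h2, List.foldl_cons, cB]
    · by_cases c2 : done.getD (done.length - 2) "" = "---\n" ∧ line = "\n" ∧ done.getD (done.length - 1) "" = "\n"
      · have herase : (done ++ line :: rest).eraseIdx done.length = done ++ rest :=
        eraseIdx_append_mid _ _ _
        have cB : crunchB_step done line = done := by
          unfold crunchB_step
          rw [if_pos ⟨c2.2.1, h2, c2.2.2, Or.inr c2.1⟩]
        rw [if_neg c1, if_pos c2, herase, ih done h2, List.foldl_cons, cB]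
      · have cB : crunchB_step done line = done ++ [line] := by
          unfold crunchB_step
          rw [if_neg]
          rintro ⟨ha, -, hb, hc | hc⟩
          · exact c1 ⟨ha, hb, hc⟩
          · exact c2 ⟨hc, ha, hb⟩
        have := ih (done ++ [line]) (by simp; omega)
        rw [if_neg c1, if_neg c2]
        have hre : done ++ line :: rest = (done ++ [line]) ++ rest := by simp
        have hl : done.length + 1 = (done ++ [line]).length := by simp
        rw [hre, hl, this, List.foldl_cons, cB]

-- ===== VERDICT (by name: the statement is the Claim_ definition above) =====
theorem crunch_lines_spec : Claim_equal_crunch_lines := by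
  unfold Claim_equal_crunch_lines
  intro line_list _
  unfold Spec_crunch_lines crunch_lines crunch_lines_alt
  match line_list with
  | [] => rw [crunchA_loop]; simp
  | [a] => rw [crunchA_loop]; simp [crunchB_step]
  | a :: b :: rest =>
    have hb : crunchB_step (crunchB_step [] a) b = [a, b] := by
      simp [crunchB_step]
    have := loop_eq rest [a, b] (by simp)
    simpa [hb] using this
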